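-- pv_equiv track=rewrite | github.com/wowo-zZ/astron-agent | core/plugin/aitools/service/ocr_llm/req_ase_ability_ocr_service.py | _deal_text_attributes
-- ===== SOURCE A (Python) =====
-- from typing import Any, Dict, List, Optional, Tuple
--
-- def _deal_text_attributes(attributes: List[Dict[str, str]]) -> str:
--     ff = "{text}"
--     for attribute in attributes:
--         name = attribute.get("name", "")
--         # Bold
--         if name == "bold":
--             ff = f"<b>{ff}</b>"
--         # Italic
--         elif name == "italic":
--             ff = f"<i>{ff}</i>"
--         # Other
--         else:
--             pass
--     return ff
-- ===== SOURCE B (Python) =====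
-- from typing import Any, Dict, List, Optional, Tuple
--
-- def _deal_text_attributes(attributes: List[Dict[str, str]]) -> str:
--     # Filter the recognised attributes to tag letters first, then build the
--     # opening prefix (reversed order) and closing suffix (forward order) in one
--     # join each, instead of incrementally re-wrapping an accumulator string.
--     tags = []
--     for attribute in attributes:
--         name = attribute.get("name", "")
--         if name == "bold":
--             tags.append("b")
--         elif name == "italic":
--             tags.append("i")
--     prefix = "".join(f"<{t}>" for t in reversed(tags))
--     suffix = "".join(f"</{t}>" for t in tags)
--     return prefix + "{text}" + suffix
-- ===== Notes on version B (the rewrite author's own statement) =====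
-- stated objective: alternative
-- what changed: Replaces the incremental accumulator re-wrapping loop with a filter of attribute names to tag letters followed by two joins: opening tags joined in reversed encounter order as a prefix and closing tags joined in forward order as a suffix.
import Mathlib
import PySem

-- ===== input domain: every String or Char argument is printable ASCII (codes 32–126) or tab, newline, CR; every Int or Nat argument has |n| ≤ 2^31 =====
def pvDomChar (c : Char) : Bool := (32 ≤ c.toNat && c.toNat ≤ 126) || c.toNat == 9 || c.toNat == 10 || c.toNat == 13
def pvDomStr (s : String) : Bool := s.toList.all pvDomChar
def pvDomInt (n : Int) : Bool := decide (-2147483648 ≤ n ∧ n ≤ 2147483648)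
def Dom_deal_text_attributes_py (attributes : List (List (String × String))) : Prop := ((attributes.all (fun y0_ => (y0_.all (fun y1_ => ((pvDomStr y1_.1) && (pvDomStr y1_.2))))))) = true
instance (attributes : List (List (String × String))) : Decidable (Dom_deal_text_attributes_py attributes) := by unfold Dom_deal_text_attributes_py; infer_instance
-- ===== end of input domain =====

-- B replaces A's incremental accumulator re-wrapping with a filter-to-tag-letters step
-- plus two joins (opening tags reversed as a prefix, closing tags forward as a suffix);
-- same cost, different decomposition.


-- ===== PORT A =====
def deal_text_attributes_py (attributes : List (List (String × String))) : String :=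
  attributes.foldl (fun ff attr =>
    let name := (PySem.Dict.ofList attr).getD "name" ""
    if name = "bold" then "<b>" ++ ff ++ "</b>"
    else if name = "italic" then "<i>" ++ ff ++ "</i>"
    else ff) "{text}"

-- ===== PORT B =====
-- B-side helper: the tag letter an attribute contributes ('b', 'i', or nothing)
def pvTag? (attr : List (String × String)) : Option String :=
  let name := (PySem.Dict.ofList attr).getD "name" ""
  if name = "bold" then some "b" else if name = "italic" then some "i" else none

def deal_text_attributes_py_alt (attributes : List (List (String × String))) : String :=
  let tags := attributes.filterMap pvTag?
  PySem.Str.join "" (tags.reverse.map (fun t => "<" ++ t ++ ">")) ++ "{text}" ++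
    PySem.Str.join "" (tags.map (fun t => "</" ++ t ++ ">"))

-- ===== PRECONDITION & SPEC =====
def Spec_deal_text_attributes_py (attributes : List (List (String × String))) (out : String) : Prop := out = deal_text_attributes_py_alt attributes
instance (attributes : List (List (String × String))) (out : String) : Decidable (Spec_deal_text_attributes_py attributes out) := by unfold Spec_deal_text_attributes_py; infer_instance

-- ===== CLAIM (what is proved, stated in full; the proofs are below) =====
def Claim_equal_deal_text_attributes_py : Prop := ∀ (attributes : List (List (String × String))), Dom_deal_text_attributes_py attributes → Spec_deal_text_attributes_py attributes (deal_text_attributes_py attributes)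

-- ===== LEMMAS AND PROOFS =====

theorem pv_join_empty_cons (x : String) (xs : List String) :
    PySem.Str.join "" (x :: xs) = x ++ PySem.Str.join "" xs := by
  apply String.toList_injective
  cases xs with
  | nil => simp [PySem.Str.join, PySem.Chars.join_nil, PySem.Chars.join_singleton]
  | cons y ys => simp [PySem.Str.join, PySem.Chars.join_cons_cons]

theorem pv_join_empty_snoc (xs : List String) (x : String) :
    PySem.Str.join "" (xs ++ [x]) = PySem.Str.join "" xs ++ x := by
  induction xs with
  | nil =>
    rw [List.nil_append, pv_join_empty_cons]
    apply String.toList_injective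
    simp [PySem.Str.join, PySem.Chars.join_nil]
  | cons y ys ih =>
    rw [List.cons_append, pv_join_empty_cons, pv_join_empty_cons, ih, String.append_assoc]

theorem pv_wrap_eq (l : List (List (String × String))) : ∀ ff : String,
    l.foldl (fun ff attr =>
      let name := (PySem.Dict.ofList attr).getD "name" ""
      if name = "bold" then "<b>" ++ ff ++ "</b>"
      else if name = "italic" then "<i>" ++ ff ++ "</i>"
      else ff) ff =
    PySem.Str.join "" ((l.filterMap pvTag?).reverse.map (fun t => "<" ++ t ++ ">")) ++ ff ++
      PySem.Str.join "" ((l.filterMap pvTag?).map (fun t => "</" ++ t ++ ">")) := by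
  induction l with
  | nil =>
    intro ff
    apply String.toList_injective
    simp [PySem.Str.join, PySem.Chars.join_nil]
  | cons a l ih =>
    intro ff
    rw [List.foldl_cons, ih]
    by_cases hb : (PySem.Dict.ofList a).getD "name" "" = "bold"
    · have ht : pvTag? a = some "b" := by simp [pvTag?, hb]
      simp only [List.filterMap_cons, ht, hb, List.reverse_cons, List.map_append,
        List.map_cons, List.map_nil, pv_join_empty_snoc, pv_join_empty_cons]
      apply String.toList_injective
      simp
    · by_cases hi : (PySem.Dict.ofList a).getD "name" "" = "italic"
      · have ht : pvTag? a = some "i" := by simp [pvTag?, hi]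
        simp only [List.filterMap_cons, ht, hi, List.reverse_cons,
          List.map_append, List.map_cons, List.map_nil, pv_join_empty_snoc, pv_join_empty_cons]
        apply String.toList_injective
        simp
      · have ht : pvTag? a = none := by simp [pvTag?, hb, hi]
        simp [ht, hb, hi]

-- ===== VERDICT (by name: the statement is the Claim_ definition above) =====
theorem deal_text_attributes_py_spec : Claim_equal_deal_text_attributes_py := by
  intro attributes _
  unfold Spec_deal_text_attributes_py deal_text_attributes_py deal_text_attributes_py_alt
  exact pv_wrap_eq attributes "{text}"
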